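-- pv_equiv track=rewrite | github.com/JerryLinyx/FinGOAT | scripts/check_api_contracts.py | parse_doc_fields
-- ===== SOURCE A (Python) =====
-- def parse_doc_fields(doc_text: str) -> dict[str, set[str]]:
--     sections: dict[str, set[str]] = {}
--     current: str | None = None
--     for raw_line in doc_text.splitlines():
--         line = raw_line.strip()
--         if line.startswith("## "):
--             current = line.removeprefix("## ").strip()
--             sections[current] = set()
--             continue
--         if current and line.startswith("- `") and line.count("`") >= 2:
--             field = line.split("`", 2)[1].strip()
--             if "->" not in line:
--                 sections[current].add(field)
--     return sections
-- ===== SOURCE B (Python) =====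
-- def _is_header(raw_line):
--     return raw_line.strip().startswith("## ")
--
--
-- def _header_name(raw_line):
--     line = raw_line.strip()
--     return line.removeprefix("## ").strip()
--
--
-- def _field_of(raw_line):
--     line = raw_line.strip()
--     if line.startswith("- `") and line.count("`") >= 2 and "->" not in line:
--         return line.split("`", 2)[1].strip()
--     return None
--
--
-- def parse_doc_fields(doc_text: str) -> dict[str, set[str]]:
--     lines = doc_text.splitlines()
--     # phase 1: partition into (section name, body lines) blocks; pre-header lines drop
--     blocks = []
--     i, n = 0, len(lines)
--     while i < n:
--         if _is_header(lines[i]):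
--             j = i + 1
--             while j < n and not _is_header(lines[j]):
--                 j += 1
--             blocks.append((_header_name(lines[i]), lines[i + 1:j]))
--             i = j
--         else:
--             i += 1
--     # phase 2: extract fields per block; duplicate names overwrite (last block wins);
--     # an empty section name collects no fields (A's 'current' truthiness)
--     sections = {}
--     for name, body in blocks:
--         fields = set()
--         if name:
--             for raw in body:
--                 f = _field_of(raw)
--                 if f is not None:
--                     fields.add(f)
--         sections[name] = fields
--     return sections
-- ===== Notes on version B (the rewrite author's own statement) =====
-- stated objective: alternative
-- what changed: A's single fused loop carrying a (dict, current-section) state is re-decomposed into two phases: first partition the lines into (header name, body-lines) blocks, then build each section's field set from its block and fold the blocks into the dict (duplicate headers overwrite, pre-header lines are dropped).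
import Mathlib
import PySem

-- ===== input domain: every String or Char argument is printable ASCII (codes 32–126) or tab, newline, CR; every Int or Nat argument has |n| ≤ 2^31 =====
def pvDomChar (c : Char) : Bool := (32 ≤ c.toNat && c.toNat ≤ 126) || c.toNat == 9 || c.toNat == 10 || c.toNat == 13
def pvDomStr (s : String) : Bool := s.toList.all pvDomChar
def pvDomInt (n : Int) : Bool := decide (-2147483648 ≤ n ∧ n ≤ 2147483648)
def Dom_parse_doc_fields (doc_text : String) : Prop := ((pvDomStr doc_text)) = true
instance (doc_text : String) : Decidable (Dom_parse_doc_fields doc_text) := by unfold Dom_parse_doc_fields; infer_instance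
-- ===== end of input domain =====

-- B re-decomposes A's fused line loop into two phases (partition lines into header blocks, then
-- extract each block's field set); same return value, objective: alternative decomposition.

-- ===== PORT A =====
-- one step of A's for-loop; state = (sections dict, current section or None)
-- str.removeprefix is ported by hand (exact): drop the prefix iff startswith
def pvStepA (st : PySem.Dict String (PySem.Set String) × Option String) (raw_line : String) :
    PySem.Dict String (PySem.Set String) × Option String :=
  let line := PySem.Str.strip raw_line
  if PySem.Str.startswith line "## " then
    let current := PySem.Str.strip
      (if PySem.Str.startswith line "## " then String.ofList (line.toList.drop 3) else line)
    (st.1.insert current PySem.Set.empty, some current)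
  else
    match st.2 with
    | none => st
    | some current =>
      if current ≠ "" ∧ PySem.Str.startswith line "- `" = true ∧ 2 ≤ PySem.Str.count line "`" then
        let field := PySem.Str.strip
          (PySem.List.pyGetD ((PySem.Str.splitMax? line "`" 2).getD []) 1 "")
        if PySem.Str.isIn "->" line = false then
          (st.1.modify current PySem.Set.empty (fun s => PySem.Set.add s field), st.2)
        else st
      else st

def parse_doc_fields (doc_text : String) : List (String × List String) :=
  ((PySem.Str.splitlines doc_text).foldl pvStepA (PySem.Dict.empty, none)).1.items

-- ===== PORT B =====
def pvIsHeader (raw_line : String) : Bool :=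
  PySem.Str.startswith (PySem.Str.strip raw_line) "## "

-- str.removeprefix ported by hand (exact): drop the prefix iff startswith
def pvHeaderName (raw_line : String) : String :=
  let line := PySem.Str.strip raw_line
  PySem.Str.strip (if PySem.Str.startswith line "## " then String.ofList (line.toList.drop 3) else line)

def pvFieldOf (raw_line : String) : Option String :=
  let line := PySem.Str.strip raw_line
  if PySem.Str.startswith line "- `" = true ∧ 2 ≤ PySem.Str.count line "`" ∧
      PySem.Str.isIn "->" line = false then
    some (PySem.Str.strip (PySem.List.pyGetD ((PySem.Str.splitMax? line "`" 2).getD []) 1 ""))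
  else none

-- phase 1: (section name, body lines) blocks; lines before the first header are dropped
def pvBlocks : List String → List (String × List String)
  | [] => []
  | l :: rest =>
    if pvIsHeader l then
      (pvHeaderName l, rest.takeWhile (fun x => !pvIsHeader x)) ::
        pvBlocks (rest.dropWhile (fun x => !pvIsHeader x))
    else pvBlocks rest
termination_by ls => ls.length
decreasing_by
  · exact Nat.lt_succ_of_le (List.length_dropWhile_le _ _)
  · simp

-- phase 2 per block: the set of fields of the body lines
def pvFields (body : List String) : PySem.Set String :=
  body.foldl (fun s raw =>
    match pvFieldOf raw with
    | some f => PySem.Set.add s f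
    | none => s) PySem.Set.empty

def parse_doc_fields_alt (doc_text : String) : List (String × List String) :=
  ((pvBlocks (PySem.Str.splitlines doc_text)).foldl
    (fun d b => d.insert b.1 (if b.1 = "" then PySem.Set.empty else pvFields b.2))
    PySem.Dict.empty).items

-- ===== PRECONDITION & SPEC =====
def Spec_parse_doc_fields (doc_text : String) (out : List (String × List String)) : Prop := out = parse_doc_fields_alt doc_text
instance (doc_text : String) (out : List (String × List String)) : Decidable (Spec_parse_doc_fields doc_text out) := by unfold Spec_parse_doc_fields; infer_instance

-- ===== CLAIM (what is proved, stated in full; the proofs are below) =====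
def Claim_equal_parse_doc_fields : Prop := ∀ (doc_text : String), Dom_parse_doc_fields doc_text → Spec_parse_doc_fields doc_text (parse_doc_fields doc_text)

-- ===== LEMMAS AND PROOFS =====

-- pvFields from an arbitrary start set (loop-generalised form of pvFields)
def pvExtend (s : PySem.Set String) (body : List String) : PySem.Set String :=
  body.foldl (fun s raw =>
    match pvFieldOf raw with
    | some f => PySem.Set.add s f
    | none => s) s

-- B's phase-2 fold from an arbitrary start dict
def pvFoldB (d : PySem.Dict String (PySem.Set String)) (bs : List (String × List String)) :
    PySem.Dict String (PySem.Set String) :=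
  bs.foldl (fun d b => d.insert b.1 (if b.1 = "" then PySem.Set.empty else pvFields b.2)) d

theorem pvFields_eq_extend (body : List String) : pvFields body = pvExtend PySem.Set.empty body := rfl

theorem pv_modify_insert_self (d : PySem.Dict String (PySem.Set String)) (k : String)
    (v : PySem.Set String) (f : PySem.Set String → PySem.Set String) :
    (d.insert k v).modify k PySem.Set.empty f = d.insert k (f v) := by
  rw [PySem.Dict.modify, PySem.Dict.getD_insert_self, PySem.Dict.insert_insert_self]

-- A's step on a header line: open the named section with an empty set
theorem pv_step_header (l : String) (st : PySem.Dict String (PySem.Set String) × Option String)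
    (hh : pvIsHeader l = true) :
    pvStepA st l = (st.1.insert (pvHeaderName l) PySem.Set.empty, some (pvHeaderName l)) := by
  have hsw : PySem.Str.startswith (PySem.Str.strip l) "## " = true := hh
  unfold pvStepA pvHeaderName
  simp only [hsw, if_true]

-- A's step on a non-header, non-field line: no change
theorem pv_step_skip (l : String) (d : PySem.Dict String (PySem.Set String)) (c : String)
    (hb : pvIsHeader l = false) (hf : pvFieldOf l = none) :
    pvStepA (d, some c) l = (d, some c) := by
  have hsw : PySem.Str.startswith (PySem.Str.strip l) "## " = false := hb
  simp only [pvFieldOf] at hf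
  unfold pvStepA
  simp only [hsw, Bool.false_eq_true, if_false]
  split_ifs with h1 h2
  · exfalso; rw [if_pos ⟨h1.2.1, h1.2.2, h2⟩] at hf; cases hf
  · rfl
  · rfl

-- A's step with current = "": the falsy current collects nothing
theorem pv_step_empty (l : String) (d : PySem.Dict String (PySem.Set String))
    (hb : pvIsHeader l = false) :
    pvStepA (d, some "") l = (d, some "") := by
  have hsw : PySem.Str.startswith (PySem.Str.strip l) "## " = false := hb
  unfold pvStepA
  simp only [hsw, Bool.false_eq_true, if_false]
  rw [if_neg (fun hcond => hcond.1 rfl)]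

-- A's step on a field line: add the field into the current section's set
theorem pv_step_field (l : String) (d : PySem.Dict String (PySem.Set String)) (c : String)
    (s : PySem.Set String) (f : String)
    (hb : pvIsHeader l = false) (hc : c ≠ "") (hf : pvFieldOf l = some f) :
    pvStepA (d.insert c s, some c) l = (d.insert c (PySem.Set.add s f), some c) := by
  have hsw : PySem.Str.startswith (PySem.Str.strip l) "## " = false := hb
  simp only [pvFieldOf] at hf
  unfold pvStepA
  simp only [hsw, Bool.false_eq_true, if_false]
  split_ifs with h1 h2
  · rw [if_pos ⟨h1.2.1, h1.2.2, h2⟩] at hf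
    injection hf with hf
    rw [pv_modify_insert_self, hf]
  · rw [if_neg (fun hcond => h2 hcond.2.2)] at hf; cases hf
  · rw [if_neg (fun hcond => h1 ⟨hc, hcond.1, hcond.2.1⟩)] at hf; cases hf

-- loop invariant after a header: A's remaining fold equals B's block fold
theorem pv_foldA_some (ls : List String) :
    ∀ (d : PySem.Dict String (PySem.Set String)) (c : String) (s : PySem.Set String),
      (ls.foldl pvStepA (d.insert c s, some c)).1 =
        pvFoldB (d.insert c (if c = "" then s
                             else pvExtend s (ls.takeWhile (fun x => !pvIsHeader x))))
          (pvBlocks (ls.dropWhile (fun x => !pvIsHeader x))) := by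
  induction ls with
  | nil =>
    intro d c s
    simp [pvFoldB, pvBlocks, pvExtend]
  | cons l rest ih =>
    intro d c s
    by_cases hh : pvIsHeader l = true
    · -- header line: A switches section, B starts a new block here
      rw [List.foldl_cons, pv_step_header l _ hh, ih]
      simp [pvBlocks, hh, pvFoldB, pvFields_eq_extend, pvExtend]
    · -- non-header line
      have hb : pvIsHeader l = false := by simpa using hh
      rw [List.foldl_cons]
      by_cases hc : c = ""
      · subst hc
        rw [pv_step_empty l _ hb, ih]
        simp [hb]
      · rcases hf : pvFieldOf l with _ | f
        · -- no field on this line: A leaves the state, B's extend skips it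
          rw [pv_step_skip l _ c hb hf, ih]
          simp [hb, pvExtend, hf]
        · -- field line: A adds into the current set, B's extend collects it
          rw [pv_step_field l d c s f hb hc hf, ih]
          simp [hb, hc, pvExtend, hf]

-- before the first header: lines are dropped; then the invariant takes over
theorem pv_foldA_none (ls : List String) :
    ∀ (d : PySem.Dict String (PySem.Set String)),
      (ls.foldl pvStepA (d, none)).1 = pvFoldB d (pvBlocks ls) := by
  induction ls with
  | nil => intro d; simp [pvFoldB, pvBlocks]
  | cons l rest ih =>
    intro d
    by_cases hh : pvIsHeader l = true
    · rw [List.foldl_cons, pv_step_header l _ hh, pv_foldA_some]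
      simp [pvBlocks, hh, pvFoldB, pvFields_eq_extend, pvExtend]
    · have hb : pvIsHeader l = false := by simpa using hh
      have hstep : pvStepA (d, none) l = (d, none) := by
        have hsw : PySem.Str.startswith (PySem.Str.strip l) "## " = false := hb
        unfold pvStepA
        simp only [hsw, Bool.false_eq_true, if_false]
      rw [List.foldl_cons, hstep, ih]
      simp [pvBlocks, hb]

-- ===== VERDICT (by name: the statement is the Claim_ definition above) =====
theorem parse_doc_fields_spec : Claim_equal_parse_doc_fields := by
  intro doc_text _
  unfold Spec_parse_doc_fields parse_doc_fields parse_doc_fields_alt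
  rw [pv_foldA_none]
  rfl
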